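-- pv_equiv track=rewrite | github.com/LLLn-J/CS111 | Problem Set 7/ps7pr1.py | inner_grid
-- ===== SOURCE A (Python) =====
-- def create_grid(height, width):
--     """ creates and returns a 2-D list of 0s with the specified dimensions.
--         inputs: height and width are non-negative integers
--     """
--     grid = []
--
--     for r in range(height):
--         row = [0] * width  # a row containing width 0s
--         grid += [row]
--
--     return grid
--
-- def inner_grid(height, width):
--     """ creates and returns a 2-D list of height rows and width
--     columns in which the “inner” cells are all 1 and the cells
--     on the outer border are all 0.
--     """
--     grid = create_grid(height, width)
--     for row in range(height):
--         for col in range(width):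
--             if row == 0 or col == 0 or row == height - 1 or col == width - 1:
--                 grid[row][col] = 0
--             else:
--                 grid[row][col] = 1
--     return grid
-- ===== SOURCE B (Python) =====
-- def inner_grid(height, width):
--     grid = [[1] * width for _ in range(height)]
--     if height > 0 and width > 0:
--         grid[0] = [0] * width
--         grid[height - 1] = [0] * width
--         for r in range(height):
--             grid[r][0] = 0
--             grid[r][width - 1] = 0
--     return grid
-- ===== Notes on version B (the rewrite author's own statement) =====
-- stated objective: alternative
-- what changed: Replaces A's zero-grid plus per-cell border/interior branch with an all-1s fill followed by separate whole-row and per-row column border-painting passes (no per-cell conditional).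
import Mathlib
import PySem

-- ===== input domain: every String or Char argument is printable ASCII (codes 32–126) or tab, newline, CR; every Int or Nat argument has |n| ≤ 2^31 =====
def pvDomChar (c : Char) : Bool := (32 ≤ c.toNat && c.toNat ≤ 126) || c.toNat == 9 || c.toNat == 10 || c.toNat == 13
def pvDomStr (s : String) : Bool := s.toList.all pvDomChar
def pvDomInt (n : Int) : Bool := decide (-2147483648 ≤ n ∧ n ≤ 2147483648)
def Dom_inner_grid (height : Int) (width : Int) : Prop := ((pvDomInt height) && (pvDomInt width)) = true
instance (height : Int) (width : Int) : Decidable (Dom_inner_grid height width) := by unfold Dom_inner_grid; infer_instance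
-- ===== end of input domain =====

-- B replaces the per-cell border/interior branch by an all-1s fill plus separate border-painting passes (alternative decomposition, same cost).

-- ===== PORT A =====
-- [0] * width = List.replicate width.toNat 0 (Python's list repetition is empty for width ≤ 0)
def create_grid (height : Int) (width : Int) : List (List Int) :=
  (PySem.List.pyRange 0 height 1).foldl
    (fun grid _ => grid ++ [List.replicate width.toNat (0 : Int)]) []

-- grid[row][col] = v is ported as pySetD on the fetched row (indices are non-negative and in range here)
def inner_grid (height : Int) (width : Int) : List (List Int) :=
  (PySem.List.pyRange 0 height 1).foldl
    (fun grid row =>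
      (PySem.List.pyRange 0 width 1).foldl
        (fun g col =>
          PySem.List.pySetD g row
            (PySem.List.pySetD (PySem.List.pyGetD g row []) col
              (if row = 0 ∨ col = 0 ∨ row = height - 1 ∨ col = width - 1 then (0 : Int) else 1)))
        grid)
    (create_grid height width)

-- ===== PORT B =====
def inner_grid_alt (height : Int) (width : Int) : List (List Int) :=
  let grid := (PySem.List.pyRange 0 height 1).map
    (fun _ => List.replicate width.toNat (1 : Int))
  if height > 0 ∧ width > 0 then
    let g1 := PySem.List.pySetD grid 0 (List.replicate width.toNat (0 : Int))
    let g2 := PySem.List.pySetD g1 (height - 1) (List.replicate width.toNat (0 : Int))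
    (PySem.List.pyRange 0 height 1).foldl
      (fun g r =>
        PySem.List.pySetD g r
          (PySem.List.pySetD
            (PySem.List.pySetD (PySem.List.pyGetD g r []) 0 (0 : Int))
            (width - 1) (0 : Int)))
      g2
  else grid

-- ===== PRECONDITION & SPEC =====
def Spec_inner_grid (height : Int) (width : Int) (out : List (List Int)) : Prop := out = inner_grid_alt height width
instance (height : Int) (width : Int) (out : List (List Int)) : Decidable (Spec_inner_grid height width out) := by unfold Spec_inner_grid; infer_instance

-- ===== CLAIM (what is proved, stated in full; the proofs are below) =====
def Claim_equal_inner_grid : Prop := ∀ (height : Int) (width : Int), Dom_inner_grid height width → Spec_inner_grid height width (inner_grid height width)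

-- ===== LEMMAS AND PROOFS =====

-- filling positions 0..n-1 of a row by index
theorem pvRowFill (f : Nat → Int) :
    ∀ (n : Nat) (l : List Int), n ≤ l.length →
      (List.range n).foldl (fun acc c => acc.set c (f c)) l
        = (List.range n).map f ++ l.drop n := by
  intro n
  induction n with
  | zero => simp
  | succ n ih =>
    intro l hl
    rw [List.range_succ, List.foldl_append, ih l (by omega)]
    simp only [List.foldl_cons, List.foldl_nil, List.map_append, List.map_cons, List.map_nil]
    rw [List.set_append_right _ _ (by simp)]
    simp only [List.length_map, List.length_range, Nat.sub_self]
    rw [List.drop_eq_getElem_cons (by omega : n < l.length), List.set_cons_zero]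
    simp

-- repeated update of the same row r
theorem pvSameRow {α β : Type} (d : α) (r : Nat) (h : α → β → α) :
    ∀ (cs : List β) (g : List α), r < g.length →
      cs.foldl (fun acc c => acc.set r (h (acc.getD r d) c)) g
        = g.set r (cs.foldl h (g.getD r d)) := by
  intro cs
  induction cs with
  | nil =>
    intro g hg
    rw [List.foldl_nil, List.foldl_nil, List.getD_eq_getElem _ _ hg, List.set_getElem_self]
  | cons c cs ih =>
    intro g hg
    simp only [List.foldl_cons]
    rw [ih _ (by simpa using hg), List.set_set,
        List.getD_eq_getElem _ _ (by simpa using hg),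
        List.getElem_set_self, List.getD_eq_getElem _ _ hg]

-- a row-by-row pass: each step rewrites row r from its current content
theorem pvRowsFold {α : Type} (d : α) (step : List α → Nat → List α) (F : Nat → α → α)
    (hstep : ∀ (acc : List α) (r : Nat), r < acc.length →
      step acc r = acc.set r (F r (acc.getD r d))) :
    ∀ (n : Nat) (g : List α), n ≤ g.length →
      (List.range n).foldl step g
        = (List.range n).map (fun r => F r (g.getD r d)) ++ g.drop n := by
  intro n
  induction n with
  | zero => simp
  | succ n ih =>
    intro g hg
    rw [List.range_succ, List.foldl_append, ih g (by omega)]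
    simp only [List.foldl_cons, List.foldl_nil]
    have hget : ((List.range n).map (fun r => F r (g.getD r d)) ++ g.drop n).getD n d
        = g.getD n d := by
      rw [List.getD_eq_getElem _ _ (by simp; omega), List.getD_eq_getElem _ _ (by omega : n < g.length)]
      simp [List.getElem_append_right]
    rw [hstep _ n (by simp; omega), hget, List.set_append_right _ _ (by simp)]
    simp only [List.length_map, List.length_range, Nat.sub_self]
    rw [List.drop_eq_getElem_cons (by omega : n < g.length), List.set_cons_zero]
    simp

theorem pv_inner_grid_eq (height width : Int) :
    inner_grid height width
      = (List.range height.toNat).map (fun (r : Nat) =>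
          (List.range width.toNat).map (fun (c : Nat) =>
            if (r : Int) = 0 ∨ (c : Int) = 0 ∨ (r : Int) = height - 1 ∨ (c : Int) = width - 1
            then (0 : Int) else 1)) := by
  have hcg : create_grid height width
      = List.replicate height.toNat (List.replicate width.toNat (0 : Int)) := by
    rw [create_grid, PySem.List.foldl_append_singleton_eq_map]
    simp [List.map_const', PySem.List.length_pyRange_one]
  rw [inner_grid, hcg, PySem.List.pyRange_one, PySem.List.pyRange_one, List.foldl_map]
  simp only [Int.sub_zero, zero_add, List.foldl_map, PySem.List.pySetD_natCast,
    PySem.List.pyGetD_natCast]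
  rw [pvRowsFold [] _
      (fun (r : Nat) (l : List Int) => (List.range width.toNat).foldl
        (fun acc (c : Nat) => acc.set c
          (if (r : Int) = 0 ∨ (c : Int) = 0 ∨ (r : Int) = height - 1 ∨ (c : Int) = width - 1
           then (0 : Int) else 1)) l)
      (by
        intro acc r hr
        exact pvSameRow [] r
          (fun l (c : Nat) => l.set c
            (if (r : Int) = 0 ∨ (c : Int) = 0 ∨ (r : Int) = height - 1 ∨ (c : Int) = width - 1
             then (0 : Int) else 1))
          (List.range width.toNat) acc hr)
      height.toNat _ (by simp)]
  simp only [List.drop_replicate, Nat.sub_self, List.replicate_zero, List.append_nil]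
  refine List.map_congr_left (fun r hr => ?_)
  rw [List.getD_eq_getElem _ _ (by simpa using List.mem_range.mp hr),
      List.getElem_replicate,
      pvRowFill _ width.toNat _ (by simp), List.drop_replicate]
  simp

theorem pv_inner_grid_alt_eq (height width : Int) (hh : height > 0) (hw : width > 0) :
    inner_grid_alt height width
      = (List.range height.toNat).map (fun (r : Nat) =>
          ((((if r = 0 ∨ (r : Int) = height - 1
              then List.replicate width.toNat (0 : Int)
              else List.replicate width.toNat 1).set 0 0).set (width - 1).toNat 0))) := by
  have s0 : ∀ (l : List Int), PySem.List.pySetD l (0 : Int) (0 : Int) = l.set 0 0 := by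
    intro l; rw [PySem.List.pySetD_of_nonneg _ _ (by omega : (0:Int) ≤ 0)]; rfl
  have sw : ∀ (l : List Int), PySem.List.pySetD l (width - 1) (0 : Int) = l.set (width - 1).toNat 0 :=
    fun l => PySem.List.pySetD_of_nonneg _ _ (by omega)
  simp only [inner_grid_alt]
  rw [if_pos ⟨hh, hw⟩]
  rw [PySem.List.pySetD_of_nonneg _ _ (by omega : (0:Int) ≤ height - 1),
      PySem.List.pySetD_of_nonneg _ _ (by omega : (0:Int) ≤ 0)]
  simp only [Int.toNat_zero]
  rw [PySem.List.pyRange_one]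
  simp only [Int.sub_zero, zero_add, List.foldl_map, PySem.List.pySetD_natCast,
    PySem.List.pyGetD_natCast, s0, sw]
  rw [pvRowsFold [] _
      (fun (r : Nat) (l : List Int) => (l.set 0 0).set (width - 1).toNat 0)
      (by intro acc r hr; rfl)
      height.toNat _ (by simp)]
  rw [List.drop_eq_nil_of_le (by simp), List.append_nil]
  refine List.map_congr_left (fun r hr => ?_)
  have hrlt : r < height.toNat := List.mem_range.mp hr
  congr 2
  have hlen1 : (((PySem.List.pyRange 0 height 1).map fun _ => List.replicate width.toNat (1:Int)).set
      (0:Int).toNat (List.replicate width.toNat 0)).length = height.toNat := by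
    simp
  by_cases h1 : r = (height - 1).toNat
  · subst h1
    rw [List.getD_eq_getElem _ _ (by simp; omega), List.getElem_set_self]
    rw [if_pos (Or.inr (by omega : (((height-1).toNat : Nat) : Int) = height - 1))]
  · rw [List.getD_eq_getElem _ _ (by simp; omega), List.getElem_set_ne (by omega)]
    by_cases h0 : r = 0
    · subst h0
      rw [List.getElem_set_self, if_pos (Or.inl rfl)]
    · rw [List.getElem_set_ne (by omega), List.getElem_map, if_neg]
      push Not
      exact ⟨h0, by omega⟩

-- ===== VERDICT (by name: the statement is the Claim_ definition above) =====
theorem inner_grid_spec : Claim_equal_inner_grid := by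
  intro height width _
  show inner_grid height width = inner_grid_alt height width
  by_cases hpos : height > 0 ∧ width > 0
  · obtain ⟨hh, hw⟩ := hpos
    rw [pv_inner_grid_eq, pv_inner_grid_alt_eq height width hh hw]
    refine List.map_congr_left (fun r hr => ?_)
    have hrlt : r < height.toNat := List.mem_range.mp hr
    by_cases hb : r = 0 ∨ (r : Int) = height - 1
    · rw [if_pos hb]
      have hall : ∀ c ∈ List.range width.toNat,
          (if (r : Int) = 0 ∨ (c : Int) = 0 ∨ (r : Int) = height - 1 ∨ (c : Int) = width - 1
           then (0:Int) else 1) = 0 := by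
        intro c _
        rcases hb with hb | hb
        · exact if_pos (Or.inl (by omega))
        · exact if_pos (Or.inr (Or.inr (Or.inl hb)))
      rw [List.map_congr_left hall, List.map_const', List.length_range,
          List.set_replicate_self, List.set_replicate_self]
    · rw [if_neg hb]
      push Not at hb
      apply List.ext_getElem (by simp)
      intro j hj hj'
      simp only [List.length_map, List.length_range] at hj
      simp only [List.getElem_map, List.getElem_range]
      rw [List.getElem_set, List.getElem_set]
      simp only [List.getElem_replicate]
      by_cases hjw : (width - 1).toNat = j
      · rw [if_pos hjw, if_pos (Or.inr (Or.inr (Or.inr (by omega))))]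
      · rw [if_neg hjw]
        by_cases hj0 : (0 : Nat) = j
        · rw [if_pos hj0, if_pos (Or.inr (Or.inl (by omega)))]
        · rw [if_neg hj0, if_neg]
          push Not
          exact ⟨by omega, by omega, by omega, by omega⟩
  · rw [pv_inner_grid_eq]
    simp only [inner_grid_alt]
    rw [if_neg hpos, PySem.List.pyRange_one]
    simp only [Int.sub_zero, zero_add, List.map_map]
    refine List.map_congr_left (fun r hr => ?_)
    have hwz : width.toNat = 0 ∨ height.toNat = 0 := by
      rcases not_and_or.mp hpos with h | h
      · right; omega
      · left; omega
    rcases hwz with h | h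
    · simp [h]
    · simp [h] at hr
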